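-- pv_equiv track=rewrite | github.com/Gauss-p/leetcode | leetcode2025/2025_04/leetcode2025-04-15.py | goodTriplets
-- ===== SOURCE A (Python) =====
-- from typing import List
--
-- class TreeArray:
--     # 树状列表，定义一个列表tree，其中每一个值对应原列表中某一段的和，它的组成方式是这样的，索引从1开始，如果我们要求[1,i]的原数组之和，那么它可以用i的二进制位上为1的那些位置进行分割，从1开始，同时从i二进制的最高位开始，如果(i>>x)&1=1，那么答案就要加上一个tree[a+2**x]，其中a的值为上一个区间的结尾位置
--     # 举个例子，如果原列表长度为4
--     # |-----------------s[4]------------------------|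
--     #            /                     /         |
--     # |--------s[2]---------|         /          |
--     #        /        |              /           |
--     # |--s[1]--|      |         |--s[3]--|       |
--     #      /          |              |           |
--     #   base[1]     base[2]      base[3]       base[4]
--     # 那么我们可以根据这个定义，设计一个更新函数和一个求前缀和的函数(此处前缀和的原列表base中的base[i]应该指的是数字i在NewNums2中的出现次数)，两者思路大致相同，不过更新的函数是依次向后更新，求前缀和只需根据定义依次向前更新即可
--     def __init__(self, n):
--         self.tree = [0]*(n+1)
--
--     def update(self, pos, val):
--         while pos<len(self.tree):
--             self.tree[pos] += val
--             pos += (pos & -pos)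
--
--     def preSum(self, pos):
--         res = 0
--         while pos>0:
--             res += self.tree[pos]
--             pos -= (pos & -pos)
--         return res
--
-- def goodTriplets(nums1: List[int], nums2: List[int]) -> int:
--     # 思路如下，为了求nums1和nums2中的相同顺序三元组的数量，可以考虑将nums1中的数字进行映射，使得nums1变成一个单调递增数组，同时将同样的映射放在nums2上，得到一个新数组NewNums2。举个例子，如果nums1=[2,0,1,3]，nums2=[0,1,2,3]，那么通过映射，nums1变成了[0,1,2,3]，NewNums2则为[1,2,0,3]
--     # 这时，由于在刚才的映射中我们没有改变数组中数字顺序，所以如果现在nums1和nums2中的某两个三元组顺序相同，那么在原来它们的顺序也同样相同，因此，问题变成了在NewNums2中找到所有单调递增的三元组数量，在上面了例子中就相当于求[1,2,0,3]中单调递增的三元组数量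
--     # 在一个数组arr中，如果索引(i,j,k)对应的三元组(arr[i],arr[j],arr[k])是单调递增的，那么arr[i]<arr[j]，arr[k]>arr[j]，所以对于一个数字arr[j]，如果知道它左边的小于arr[j]的数字数量less，就可以知道它右边的大于arr[j]的数字数量。因为左边一共有j个数字，所以左边大于arr[j]的数字数量就是j-less，又因为数组中一共有n-j-1个数字大于arr[j]，所以j右边大于arr[j]的数字数量就是(n-j-1-(j-less))，将其与less相乘即可得到以arr[j]为中间元素的单调递增三元组数量
--     # 下面有两种方法，第一种，每次用SortedList中的bisect_left求出当前数字arr[i]的所处位置，它的索引即为less，然后根据上面的公式累加答案，最后将当前值加入SortedList中即可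
--     # 第二种，用树状列表，利用树状列表的增加和求和方法快速求出less的值进行计算即可
--     n = len(nums1)
--     funx = [0]*n
--     for i in range(n):
--         funx[nums1[i]] = i
--
--     res = 0
--     # sl = [0]*(n+1)
--     sl = TreeArray(n)
--     for i in range(n):
--         v = nums2[i]
--         y = funx[v]
--         # less = sum(sl[:y+1])
--         less = sl.preSum(y)
--         res += less*(n-y-1-(i-less))
--         # sl[y+1] = 1
--         sl.update(y+1, 1)
--     return res
-- ===== SOURCE B (Python) =====
-- from typing import List
--
-- # Simpler re-implementation: same index-mapping step, but the middle-element
-- # count 'less' is obtained by a direct scan over the already-seen mapped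
-- # values instead of a Fenwick (binary indexed) tree.
-- def goodTriplets(nums1: List[int], nums2: List[int]) -> int:
--     n = len(nums1)
--     funx = [0] * n
--     for i in range(n):
--         funx[nums1[i]] = i
--     res = 0
--     seen = []
--     for v in nums2[:n]:
--         y = funx[v]
--         less = 0
--         for t in seen:
--             if t < y:
--                 less += 1
--         i = len(seen)
--         res += less * (n - y - 1 - (i - less))
--         seen.append(y)
--     return res
-- ===== Notes on version B (the rewrite author's own statement) =====
-- stated objective: simpler
-- what changed: The Fenwick (binary indexed) tree that maintained prefix counts of already-seen mapped positions is replaced by a plain list of the seen mapped values with a direct linear scan counting those smaller than the current value; the mapping step and the res accumulation formula are unchanged.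
import Mathlib
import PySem

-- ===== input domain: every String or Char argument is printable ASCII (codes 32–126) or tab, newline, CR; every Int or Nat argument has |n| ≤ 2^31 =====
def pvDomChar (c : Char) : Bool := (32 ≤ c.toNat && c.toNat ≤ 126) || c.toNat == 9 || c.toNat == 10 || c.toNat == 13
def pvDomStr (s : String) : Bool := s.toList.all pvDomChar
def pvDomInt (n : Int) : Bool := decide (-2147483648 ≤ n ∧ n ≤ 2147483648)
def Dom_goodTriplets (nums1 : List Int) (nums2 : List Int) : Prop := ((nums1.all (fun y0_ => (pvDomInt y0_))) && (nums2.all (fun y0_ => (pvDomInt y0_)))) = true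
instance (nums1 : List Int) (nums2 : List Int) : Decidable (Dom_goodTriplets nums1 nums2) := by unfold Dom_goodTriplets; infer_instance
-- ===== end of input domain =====

-- B replaces A's Fenwick (binary indexed) tree by a plain list of the already-seen
-- mapped values with a direct counting scan: simpler, same return value on all of Pre_.

-- ===== PORT A =====

-- pos & -pos of a positive int is between 1 and pos (cited by the termination proofs below)
theorem pv_band_bounds (p : Int) (h : 1 ≤ p) :
    1 ≤ PySem.Int.band p (-p) ∧ PySem.Int.band p (-p) ≤ p := by
  have he : PySem.Int.band p (-p) = ((p.toNat - (p.toNat &&& (p.toNat - 1)) : ℕ) : Int) := by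
    unfold PySem.Int.band
    rw [if_pos (by omega), if_neg (by omega)]
    have h1 : (- -p - 1).toNat = p.toNat - 1 := by omega
    rw [h1]
  have h2 : p.toNat &&& (p.toNat - 1) ≤ p.toNat - 1 := Nat.and_le_right
  rw [he]; omega

-- TreeArray.update: `while pos < len(tree): tree[pos] += val; pos += pos & -pos`.
-- Under Pre_ every call has 1 ≤ pos ≤ n < len(tree); the extra `1 ≤ pos` guard only
-- cuts loops Python never reaches there (for pos ≤ 0 the Python loop does not terminate).
def taUpdate (tree : List Int) (pos : Int) (val : Int) : List Int :=
  if h : pos < (tree.length : Int) ∧ 1 ≤ pos then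
    taUpdate (tree.set pos.toNat (tree.getD pos.toNat 0 + val)) (pos + PySem.Int.band pos (-pos)) val
  else tree
termination_by ((tree.length : Int) - pos).toNat
decreasing_by
  have hb := pv_band_bounds pos h.2
  simp only [List.length_set]
  omega

-- TreeArray.preSum: `res = 0; while pos > 0: res += tree[pos]; pos -= pos & -pos`.
-- getD is exact here: under Pre_ the initial pos is 0 ≤ pos ≤ n < len(tree) and it only decreases.
def taPreSum (tree : List Int) (pos : Int) : Int :=
  if h : 0 < pos then
    tree.getD pos.toNat 0 + taPreSum tree (pos - PySem.Int.band pos (-pos))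
  else 0
termination_by pos.toNat
decreasing_by
  have hb := pv_band_bounds pos h
  omega

-- goodTriplets, A: map nums1 value -> its index (funx), then a single pass over nums2
-- maintaining a Fenwick tree of seen mapped values.  pySetD/pyGetD are the exact
-- total forms of funx[...] = i / funx[v] / nums2[i]: in range under Pre_.
def goodTriplets (nums1 : List Int) (nums2 : List Int) : Int :=
  let n : Int := nums1.length
  let funx := (PySem.List.pyRange 0 n 1).foldl
    (fun f i => PySem.List.pySetD f (PySem.List.pyGetD nums1 i 0) i)
    (List.replicate n.toNat 0)
  let st := (PySem.List.pyRange 0 n 1).foldl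
    (fun (st : Int × List Int) i =>
      let v := PySem.List.pyGetD nums2 i 0
      let y := PySem.List.pyGetD funx v 0
      let less := taPreSum st.2 y
      (st.1 + less * (n - y - 1 - (i - less)), taUpdate st.2 (y + 1) 1))
    (0, List.replicate (n.toNat + 1) 0)
  st.1

-- ===== PORT B =====

-- goodTriplets, B: same mapping step; the Fenwick tree is replaced by the plain list
-- `seen` of already-seen mapped values, `less` counted by a direct scan.
def goodTriplets_alt (nums1 : List Int) (nums2 : List Int) : Int :=
  let n : Int := nums1.length
  let funx := (PySem.List.pyRange 0 n 1).foldl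
    (fun f i => PySem.List.pySetD f (PySem.List.pyGetD nums1 i 0) i)
    (List.replicate n.toNat 0)
  let st := (PySem.List.slice nums2 none (some n)).foldl
    (fun (st : Int × List Int) v =>
      let y := PySem.List.pyGetD funx v 0
      let less := st.2.foldl (fun acc t => if t < y then acc + 1 else acc) 0
      let i : Int := st.2.length
      (st.1 + less * (n - y - 1 - (i - less)), st.2 ++ [y]))
    (0, [])
  st.1

-- ===== PRECONDITION & SPEC =====

-- Exactly the inputs where the Python A returns: nums2 long enough for the main loop,
-- and every index used on funx (values of nums1, and of the read prefix of nums2) in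
-- Python's accepted range [-n, n) — outside, A raises IndexError.
def Pre_goodTriplets (nums1 : List Int) (nums2 : List Int) : Prop :=
  nums1.length ≤ nums2.length ∧
  (∀ v ∈ nums1, -(nums1.length : Int) ≤ v ∧ v < (nums1.length : Int)) ∧
  (∀ v ∈ nums2.take nums1.length, -(nums1.length : Int) ≤ v ∧ v < (nums1.length : Int))

instance (nums1 : List Int) (nums2 : List Int) : Decidable (Pre_goodTriplets nums1 nums2) := by
  unfold Pre_goodTriplets; infer_instance

def pvWitness_goodTriplets : List Int × List Int := ([1, 0, 2], [0, 1, 2])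

def Spec_goodTriplets (nums1 : List Int) (nums2 : List Int) (out : Int) : Prop :=
  out = goodTriplets_alt nums1 nums2
instance (nums1 : List Int) (nums2 : List Int) (out : Int) : Decidable (Spec_goodTriplets nums1 nums2 out) := by
  unfold Spec_goodTriplets; infer_instance

-- ===== CLAIM (what is proved, stated in full; the proofs are below) =====
def Claim_equal_goodTriplets : Prop := ∀ (nums1 : List Int) (nums2 : List Int), Dom_goodTriplets nums1 nums2 → Pre_goodTriplets nums1 nums2 → Spec_goodTriplets nums1 nums2 (goodTriplets nums1 nums2)

-- ===== LEMMAS AND PROOFS =====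

-- lowbit, proof-side name
def lbI (p : Int) : Int := PySem.Int.band p (-p)

-- Fenwick invariant: cell j holds the number of seen values t with j - lowbit j < t+1 ≤ j
def FenInv (L : ℕ) (tree seen : List Int) : Prop :=
  tree.length = L ∧
  ∀ j : ℕ, 1 ≤ j → j < L →
    tree.getD j 0 =
      (seen.countP (fun t => decide ((j : Int) - lbI (j : Int) < t + 1 ∧ t + 1 ≤ (j : Int))) : Int)

theorem pv_and_pred (k M : ℕ) :
    (2 ^ (k+1) * M + 2 ^ k) &&& (2 ^ (k+1) * M + 2 ^ k - 1) = 2 ^ (k+1) * M := by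
  have h1 : (1:ℕ) ≤ 2 ^ k := Nat.one_le_two_pow
  have hlt2 : (2:ℕ) ^ k < 2 ^ (k+1) := Nat.pow_lt_pow_succ (by omega)
  have he : 2 ^ (k+1) * M + 2 ^ k - 1 = 2 ^ (k+1) * M + (2 ^ k - 1) := by omega
  apply Nat.eq_of_testBit_eq
  intro i
  rw [Nat.testBit_and, he, Nat.testBit_two_pow_mul_add M hlt2 i,
    Nat.testBit_two_pow_mul_add M (by omega : 2 ^ k - 1 < 2 ^ (k+1)) i]
  have hM : 2 ^ (k+1) * M = 2 ^ (k+1) * M + 0 := by omega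
  rw [hM, Nat.testBit_two_pow_mul_add M (by positivity : (0:ℕ) < 2 ^ (k+1)) i]
  by_cases hik : i < k + 1
  · simp only [if_pos hik, Nat.testBit_two_pow, Nat.testBit_two_pow_sub_one, Nat.zero_testBit]
    rcases Nat.lt_or_ge i k with h | h
    · simp [Nat.ne_of_gt h]
    · simp [show ¬ (i < k) by omega]
  · simp only [if_neg hik, Bool.and_self]

theorem pv_decomp (P : ℕ) (h : 0 < P) : ∃ k M, P = 2 ^ (k+1) * M + 2 ^ k := by
  obtain ⟨k, m, hm, hP⟩ := Nat.exists_eq_two_pow_mul_odd (by omega : P ≠ 0)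
  obtain ⟨M, hM⟩ := hm
  exact ⟨k, M, by rw [hP, hM]; ring⟩

theorem pv_lb_eq (p : Int) (h : 1 ≤ p) (k M : ℕ) (hP : p.toNat = 2 ^ (k+1) * M + 2 ^ k) :
    lbI p = ((2 ^ k : ℕ) : Int) := by
  have he : lbI p = ((p.toNat - (p.toNat &&& (p.toNat - 1)) : ℕ) : Int) := by
    unfold lbI PySem.Int.band
    rw [if_pos (by omega), if_neg (by omega)]
    have h1 : (- -p - 1).toNat = p.toNat - 1 := by omega
    rw [h1]
  rw [he, hP, pv_and_pred]
  congr 1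
  exact Nat.add_sub_cancel_left _ _

theorem pv_F (k M t S q : ℕ) (hq : q = 2 ^ (t+1) * S + 2 ^ t)
    (h1 : 2 ^ (k+1) * M < q) (h2 : q < 2 ^ (k+1) * M + 2 ^ k) :
    q + 2 ^ t ≤ 2 ^ (k+1) * M + 2 ^ k := by
  have hpt : (1:ℕ) ≤ 2 ^ t := Nat.one_le_two_pow
  have htk : t < k := by
    by_contra hc
    push_neg at hc
    have hd1 : (2:ℕ) ^ k ∣ q := by
      rw [hq]
      exact Nat.dvd_add (Dvd.dvd.mul_right (pow_dvd_pow 2 (by omega)) S) (pow_dvd_pow 2 hc)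
    have hd2 : (2:ℕ) ^ k ∣ 2 ^ (k+1) * M := Dvd.dvd.mul_right (pow_dvd_pow 2 (by omega)) M
    have hd3 : (2:ℕ) ^ k ∣ q - 2 ^ (k+1) * M := Nat.dvd_sub hd1 hd2
    have hz := Nat.eq_zero_of_dvd_of_lt hd3 (by omega)
    omega
  obtain ⟨e, he⟩ : (2:ℕ) ^ (t+1) ∣ 2 ^ (k+1) * M := Dvd.dvd.mul_right (pow_dvd_pow 2 (by omega)) M
  have h2t1 : (2:ℕ) ^ (t+1) = 2 ^ t + 2 ^ t := by ring
  have hSe : e ≤ S := by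
    by_contra hc
    push_neg at hc
    have hmono : 2 ^ (t+1) * (S+1) ≤ 2 ^ (t+1) * e := Nat.mul_le_mul_left _ (by omega)
    have hS1 : 2 ^ (t+1) * (S+1) = 2 ^ (t+1) * S + 2 ^ (t+1) := by ring
    omega
  obtain ⟨c, rfl⟩ := Nat.exists_eq_add_of_le hSe
  have hq2 : q = 2 ^ (k+1) * M + 2 ^ (t+1) * c + 2 ^ t := by
    rw [hq, Nat.mul_add, ← he]
  have hkt : (2:ℕ) ^ (t+1) * 2 ^ (k-t-1) = 2 ^ k := by
    rw [← pow_add]; congr 1; omega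
  have hcb : c + 1 ≤ 2 ^ (k-t-1) := by
    by_contra hcb
    push_neg at hcb
    have : 2 ^ (t+1) * 2 ^ (k-t-1) ≤ 2 ^ (t+1) * c := Nat.mul_le_mul_left _ (by omega)
    omega
  have hfin : 2 ^ (t+1) * (c+1) ≤ 2 ^ k := by
    rw [← hkt]; exact Nat.mul_le_mul_left _ hcb
  have hc1 : 2 ^ (t+1) * (c+1) = 2 ^ (t+1) * c + 2 ^ (t+1) := by ring
  omega

theorem pv_G (k M u W j : ℕ) (hj : j = 2 ^ (u+1) * W + 2 ^ u)
    (h1 : j ≤ 2 ^ (k+1) * M) (h2 : 2 ^ (k+1) * M < j + 2 ^ u) :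
    2 ^ (k+1) * M + 2 ^ k < j + 2 ^ u := by
  have hpu : (1:ℕ) ≤ 2 ^ u := Nat.one_le_two_pow
  have hpk : (1:ℕ) ≤ 2 ^ k := Nat.one_le_two_pow
  rcases le_or_gt u k with huk | huk
  · -- u ≤ k: forces j = 2^(k+1)*M, contradiction on 2-adic valuation
    exfalso
    have hd1 : (2:ℕ) ^ u ∣ j := by
      rw [hj]
      exact Nat.dvd_add (Dvd.dvd.mul_right (pow_dvd_pow 2 (by omega)) W) dvd_rfl
    have hd2 : (2:ℕ) ^ u ∣ 2 ^ (k+1) * M := Dvd.dvd.mul_right (pow_dvd_pow 2 (by omega)) M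
    have hd3 : (2:ℕ) ^ u ∣ 2 ^ (k+1) * M - j := Nat.dvd_sub hd2 hd1
    have hz := Nat.eq_zero_of_dvd_of_lt hd3 (by omega)
    have hjP : j = 2 ^ (k+1) * M := by omega
    obtain ⟨f, hf⟩ : (2:ℕ) ^ (u+1) ∣ 2 ^ (k+1) * M := Dvd.dvd.mul_right (pow_dvd_pow 2 (by omega)) M
    have h2u1 : (2:ℕ) ^ (u+1) = 2 ^ u + 2 ^ u := by ring
    have : 2 ^ (u+1) * W + 2 ^ u = 2 ^ (u+1) * f := by rw [← hf, ← hjP, hj]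
    rcases le_or_gt f W with hfW | hfW
    · have : 2 ^ (u+1) * f ≤ 2 ^ (u+1) * W := Nat.mul_le_mul_left _ hfW
      omega
    · have : 2 ^ (u+1) * (W+1) ≤ 2 ^ (u+1) * f := Nat.mul_le_mul_left _ (by omega)
      have hW1 : 2 ^ (u+1) * (W+1) = 2 ^ (u+1) * W + 2 ^ (u+1) := by ring
      omega
  · -- k < u
    have hd1 : (2:ℕ) ^ (k+1) ∣ j := by
      rw [hj]
      exact Nat.dvd_add (Dvd.dvd.mul_right (pow_dvd_pow 2 (by omega)) W) (pow_dvd_pow 2 (by omega))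
    have hd2 : (2:ℕ) ^ (k+1) ∣ 2 ^ (k+1) * M := Dvd.dvd.mul_right dvd_rfl M
    obtain ⟨e, he⟩ : (2:ℕ) ^ (k+1) ∣ 2 ^ (k+1) * M - j := Nat.dvd_sub hd2 hd1
    have hku : (2:ℕ) ^ (k+1) * 2 ^ (u-k-1) = 2 ^ u := by
      rw [← pow_add]; congr 1; omega
    have h2k1 : (2:ℕ) ^ (k+1) = 2 ^ k + 2 ^ k := by ring
    have heb : e + 1 ≤ 2 ^ (u-k-1) := by
      by_contra hc
      push_neg at hc
      have : 2 ^ (k+1) * 2 ^ (u-k-1) ≤ 2 ^ (k+1) * e := Nat.mul_le_mul_left _ (by omega)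
      omega
    have : 2 ^ (k+1) * (e+1) ≤ 2 ^ (k+1) * 2 ^ (u-k-1) := Nat.mul_le_mul_left _ heb
    have he1 : 2 ^ (k+1) * (e+1) = 2 ^ (k+1) * e + 2 ^ (k+1) := by ring
    omega

theorem pv_lb_bounds (p : Int) (h : 1 ≤ p) : 1 ≤ lbI p ∧ lbI p ≤ p := pv_band_bounds p h

theorem pv_FI (p q : Int) (hq : 1 ≤ q) (h1 : p - lbI p < q) (h2 : q < p) : q + lbI q ≤ p := by
  have hp : 1 ≤ p := by omega
  obtain ⟨k, M, hkM⟩ := pv_decomp p.toNat (by omega)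
  obtain ⟨t, S, htS⟩ := pv_decomp q.toNat (by omega)
  have hlp := pv_lb_eq p hp k M hkM
  have hlq := pv_lb_eq q hq t S htS
  have hFn := pv_F k M t S q.toNat htS (by omega) (by omega)
  omega

theorem pv_GI (p q : Int) (hp : 1 ≤ p) (hq : 1 ≤ q) (h1 : q ≤ p - lbI p)
    (h2 : p - lbI p < q + lbI q) : p < q + lbI q := by
  obtain ⟨k, M, hkM⟩ := pv_decomp p.toNat (by omega)
  obtain ⟨u, W, huW⟩ := pv_decomp q.toNat (by omega)
  have hlp := pv_lb_eq p hp k M hkM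
  have hlq := pv_lb_eq q hq u W huW
  have hGn := pv_G k M u W q.toNat huW (by omega) (by omega)
  omega

theorem pv_update_length (tree : List Int) (pos val : Int) :
    (taUpdate tree pos val).length = tree.length := by
  induction tree, pos using taUpdate.induct (val := val) with
  | case1 tree pos h ih =>
    rw [taUpdate, dif_pos h, ih]
    simp
  | case2 tree pos h =>
    rw [taUpdate, dif_neg h]

theorem pv_update_getD (tree : List Int) (pos val : Int) :
    1 ≤ pos → ∀ j : ℕ, 1 ≤ j →
    (taUpdate tree pos val).getD j 0 =
      tree.getD j 0 +
        (if pos ≤ (j : Int) ∧ (j : Int) < (tree.length : Int) ∧ (j : Int) - lbI (j : Int) < pos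
         then val else 0) := by
  induction tree, pos using taUpdate.induct (val := val) with
  | case1 tree pos h ih =>
    intro hpos j hj
    have hb := pv_lb_bounds pos hpos
    have hJ1 : (1:Int) ≤ (j : Int) := by exact_mod_cast hj
    have hbJ := pv_lb_bounds (j : Int) hJ1
    rw [taUpdate, dif_pos h]
    have hbdef : PySem.Int.band pos (-pos) = lbI pos := rfl
    rw [ih (by omega) j hj]
    simp only [List.length_set, hbdef]
    have hset : (tree.set pos.toNat (tree.getD pos.toNat 0 + val)).getD j 0
        = if pos.toNat = j then tree.getD pos.toNat 0 + val else tree.getD j 0 := by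
      rw [List.getD_eq_getElem?_getD, List.getElem?_set]
      by_cases hpj : pos.toNat = j
      · simp [hpj, show j < tree.length by omega, List.getD_eq_getElem?_getD,
          List.getElem?_eq_getElem (show j < tree.length by omega)]
      · simp [hpj, ← List.getD_eq_getElem?_getD]
    rw [hset]
    by_cases hpj : pos.toNat = j
    · have hJp : (j : Int) = pos := by omega
      have hcA : ¬ (pos + lbI pos ≤ (j : Int) ∧ (j : Int) < (tree.length : Int) ∧
          (j : Int) - lbI (j : Int) < pos + lbI pos) := by
        rintro ⟨ha, -, -⟩; omega
      have hcB : pos ≤ (j : Int) ∧ (j : Int) < (tree.length : Int) ∧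
          (j : Int) - lbI (j : Int) < pos := ⟨by omega, by omega, by omega⟩
      rw [if_pos hpj, if_neg hcA, if_pos hcB, hpj]
      omega
    · have hIff : (pos + lbI pos ≤ (j : Int) ∧ (j : Int) < (tree.length : Int) ∧
          (j : Int) - lbI (j : Int) < pos + lbI pos) ↔
          (pos ≤ (j : Int) ∧ (j : Int) < (tree.length : Int) ∧ (j : Int) - lbI (j : Int) < pos) := by
        constructor
        · rintro ⟨ha, hbb, hc⟩
          refine ⟨by omega, hbb, ?_⟩
          by_contra hcc
          push_neg at hcc
          have := pv_GI (j : Int) pos hJ1 hpos hcc hc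
          omega
        · rintro ⟨ha, hbb, hc⟩
          have hlt : pos < (j : Int) := by omega
          have := pv_FI (j : Int) pos hpos hc hlt
          exact ⟨this, hbb, by omega⟩
      rw [if_neg hpj, if_congr hIff rfl rfl]
  | case2 tree pos h =>
    intro hpos j hj
    rw [taUpdate, dif_neg h]
    have hc : ¬ (pos ≤ (j : Int) ∧ (j : Int) < (tree.length : Int) ∧
        (j : Int) - lbI (j : Int) < pos) := by
      rintro ⟨ha, hbb, -⟩; omega
    rw [if_neg hc]
    omega

theorem pv_countP_split (l : List Int) (x y : Int) (hxy : x ≤ y) :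
    l.countP (fun t => decide (t + 1 ≤ y)) =
    l.countP (fun t => decide (t + 1 ≤ x)) + l.countP (fun t => decide (x < t + 1 ∧ t + 1 ≤ y)) := by
  induction l with
  | nil => simp
  | cons a l ih =>
    simp only [List.countP_cons, ih, decide_eq_true_eq]
    split_ifs <;> omega

theorem pv_preSum (L : ℕ) (seen : List Int) (hseen : ∀ t ∈ seen, 0 ≤ t) :
    ∀ (tree : List Int) (p : Int), FenInv L tree seen → 0 ≤ p → p < (L : Int) →
      taPreSum tree p = (seen.countP (fun t => decide (t + 1 ≤ p)) : Int) := by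
  intro tree p
  induction p using taPreSum.induct with
  | case1 p h ih =>
    intro hInv hp0 hpL
    have hb := pv_lb_bounds p h
    rw [taPreSum, dif_pos h]
    have hcell := hInv.2 p.toNat (by omega) (by omega)
    have hcast : ((p.toNat : ℕ) : Int) = p := Int.toNat_of_nonneg hp0
    simp only [hcast] at hcell
    have hbdef : PySem.Int.band p (-p) = lbI p := rfl
    rw [hbdef]
    have hrec := ih hInv (by omega) (by omega)
    rw [hbdef] at hrec
    rw [hcell, hrec, pv_countP_split seen (p - lbI p) p (by omega)]
    push_cast
    ring
  | case2 p h =>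
    intro hInv hp0 hpL
    rw [taPreSum, dif_neg h]
    have hz : seen.countP (fun t => decide (t + 1 ≤ p)) = 0 := by
      apply List.countP_eq_zero.2
      intro t ht
      have := hseen t ht
      simp only [decide_eq_true_eq]
      omega
    rw [hz]
    simp

theorem pv_step (nums2 funx : List Int) (n : Int)
    (hn2 : n ≤ (nums2.length : Int))
    (hfx : ∀ x ∈ funx, 0 ≤ x ∧ x < n)
    (hv : ∀ v ∈ nums2.take n.toNat, PySem.Raise.InRange funx.length v) :
    ∀ (d : ℕ) (a : Int) (resA resB : Int) (tree seen : List Int),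
      0 ≤ a → a + d = n → a = (seen.length : Int) →
      (∀ t ∈ seen, 0 ≤ t ∧ t < n) →
      FenInv (n.toNat + 1) tree seen →
      resA = resB →
      ((PySem.List.pyRange a n 1).foldl
        (fun (st : Int × List Int) i =>
          let v := PySem.List.pyGetD nums2 i 0
          let y := PySem.List.pyGetD funx v 0
          let less := taPreSum st.2 y
          (st.1 + less * (n - y - 1 - (i - less)), taUpdate st.2 (y + 1) 1))
        (resA, tree)).1
      =
      (((nums2.drop a.toNat).take d).foldl
        (fun (st : Int × List Int) v =>
          let y := PySem.List.pyGetD funx v 0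
          let less := st.2.foldl (fun acc t => if t < y then acc + 1 else acc) 0
          let i : Int := st.2.length
          (st.1 + less * (n - y - 1 - (i - less)), st.2 ++ [y]))
        (resB, seen)).1 := by
  intro d
  induction d with
  | zero =>
    intro a resA resB tree seen ha0 had haseen hseen hInv hres
    rw [PySem.List.pyRange_one_eq_nil (by omega), List.take_zero]
    simpa using hres
  | succ d ih =>
    intro a resA resB tree seen ha0 had haseen hseen hInv hres
    have han : a < n := by omega
    have halen : a.toNat < nums2.length := by omega
    rw [PySem.List.pyRange_one_cons han, List.drop_eq_getElem_cons halen, List.take_succ_cons,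
      List.foldl_cons, List.foldl_cons]
    have hvw : PySem.List.pyGetD nums2 a 0 = nums2[a.toNat] := by
      rw [PySem.List.pyGetD_of_nonneg nums2 0 ha0]
      exact List.getD_eq_getElem nums2 0 halen
    have hwmem : nums2[a.toNat] ∈ nums2.take n.toNat := by
      have hat : a.toNat < (nums2.take n.toNat).length := by
        simp only [List.length_take]
        omega
      have : (nums2.take n.toNat)[a.toNat] = nums2[a.toNat] := List.getElem_take
      rw [← this]
      exact List.getElem_mem hat
    have hymem := PySem.List.pyGetD_mem funx 0 (hv nums2[a.toNat] hwmem)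
    have hy := hfx _ hymem
    -- the two "less" values agree
    have hlessA : taPreSum tree (PySem.List.pyGetD funx nums2[a.toNat] 0)
        = (seen.countP (fun t => decide (t + 1 ≤ PySem.List.pyGetD funx nums2[a.toNat] 0)) : Int) :=
      pv_preSum (n.toNat + 1) seen (fun t ht => (hseen t ht).1) tree _ hInv hy.1 (by omega)
    have hlessB : seen.foldl
        (fun acc t => if t < PySem.List.pyGetD funx nums2[a.toNat] 0 then acc + 1 else acc) 0
        = (seen.countP (fun t => decide (t < PySem.List.pyGetD funx nums2[a.toNat] 0)) : Int) := by
      rw [PySem.List.foldl_ite_add_one (fun t => t < PySem.List.pyGetD funx nums2[a.toNat] 0) seen 0]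
      omega
    have hcp : seen.countP (fun t => decide (t + 1 ≤ PySem.List.pyGetD funx nums2[a.toNat] 0))
        = seen.countP (fun t => decide (t < PySem.List.pyGetD funx nums2[a.toNat] 0)) := by
      apply List.countP_congr
      intro t ht
      simp only [decide_eq_true_eq]
      omega
    simp only [hvw]
    have hstep := ih (a + 1)
      (resA + taPreSum tree (PySem.List.pyGetD funx nums2[a.toNat] 0) *
        (n - PySem.List.pyGetD funx nums2[a.toNat] 0 - 1 -
          (a - taPreSum tree (PySem.List.pyGetD funx nums2[a.toNat] 0))))
      (resB + (seen.foldl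
          (fun acc t => if t < PySem.List.pyGetD funx nums2[a.toNat] 0 then acc + 1 else acc) 0) *
        (n - PySem.List.pyGetD funx nums2[a.toNat] 0 - 1 -
          ((seen.length : Int) - seen.foldl
            (fun acc t => if t < PySem.List.pyGetD funx nums2[a.toNat] 0 then acc + 1 else acc) 0)))
      (taUpdate tree (PySem.List.pyGetD funx nums2[a.toNat] 0 + 1) 1)
      (seen ++ [PySem.List.pyGetD funx nums2[a.toNat] 0])
      (by omega) (by omega)
      (by simp only [List.length_append, List.length_cons, List.length_nil]; push_cast; omega)
      (by
        intro t ht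
        rcases List.mem_append.1 ht with h | h
        · exact hseen t h
        · rcases List.mem_singleton.1 h with rfl
          exact hy)
      (by
        constructor
        · rw [pv_update_length]
          exact hInv.1
        · intro j hj hjL
          rw [pv_update_getD tree (PySem.List.pyGetD funx nums2[a.toNat] 0 + 1) 1 (by omega) j hj,
            List.countP_append, hInv.2 j hj hjL]
          have hlen : tree.length = n.toNat + 1 := hInv.1
          simp only [List.countP_cons, List.countP_nil, decide_eq_true_eq]
          have hJ1 : (1:Int) ≤ (j : Int) := by exact_mod_cast hj
          have hbJ := pv_lb_bounds (j : Int) hJ1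
          split_ifs with h1 h2 h2 <;> [skip; skip; skip; skip] <;> push_cast <;> omega)
      (by
        have hless : taPreSum tree (PySem.List.pyGetD funx nums2[a.toNat] 0)
            = seen.foldl (fun acc t => if t < PySem.List.pyGetD funx nums2[a.toNat] 0
                then acc + 1 else acc) 0 := by
          rw [hlessA, hcp, hlessB]
        rw [hres, hless, ← haseen])
    have hton : (a + 1).toNat = a.toNat + 1 := by omega
    rw [hton] at hstep
    exact hstep

theorem pv_foldl_setD_length (nums1 : List Int) (l : List Int) (f0 : List Int) :
    (l.foldl (fun f i => PySem.List.pySetD f (PySem.List.pyGetD nums1 i 0) i) f0).length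
      = f0.length := by
  induction l generalizing f0 with
  | nil => rfl
  | cons x l ih => rw [List.foldl_cons, ih, PySem.List.length_pySetD]

theorem pv_mem_pySetD (xs : List Int) (i v x : Int) (h : x ∈ PySem.List.pySetD xs i v) :
    x ∈ xs ∨ x = v := by
  unfold PySem.List.pySetD PySem.List.pySet? at h
  cases hio : PySem.List.pyIdx? xs.length i with
  | none => rw [hio] at h; simp only [Option.map_none, Option.getD_none] at h; exact Or.inl h
  | some k =>
    rw [hio] at h
    simp only [Option.map_some, Option.getD_some] at h
    rcases List.mem_or_eq_of_mem_set h with h | h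
    exacts [Or.inl h, Or.inr h]

theorem pv_foldl_setD_mem (nums1 : List Int) (n : Int) (l : List Int)
    (hl : ∀ i ∈ l, 0 ≤ i ∧ i < n) :
    ∀ f0 : List Int, (∀ x ∈ f0, 0 ≤ x ∧ x < n) →
      ∀ x ∈ l.foldl (fun f i => PySem.List.pySetD f (PySem.List.pyGetD nums1 i 0) i) f0,
        0 ≤ x ∧ x < n := by
  induction l with
  | nil => intro f0 h0 x hx; exact h0 x hx
  | cons i l ih =>
    intro f0 h0 x hx
    refine ih (fun j hj => hl j (List.mem_cons_of_mem _ hj)) _ ?_ x hx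
    intro y hy
    rcases pv_mem_pySetD _ _ _ _ hy with h | h
    · exact h0 y h
    · rw [h]
      exact hl i List.mem_cons_self

-- ===== VERDICT (by name: the statement is the Claim_ definition above) =====
theorem goodTriplets_spec : Claim_equal_goodTriplets := by
  intro nums1 nums2 _ hpre
  obtain ⟨hlen, h1, h2⟩ := hpre
  unfold Spec_goodTriplets
  have hn0 : (0:Int) ≤ (nums1.length : Int) := by exact_mod_cast Nat.zero_le _
  simp only [goodTriplets, goodTriplets_alt]
  rw [PySem.List.slice_to nums2 hn0]
  set n : Int := (nums1.length : Int) with hn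
  set funx := (PySem.List.pyRange 0 n 1).foldl
    (fun f i => PySem.List.pySetD f (PySem.List.pyGetD nums1 i 0) i)
    (List.replicate n.toNat 0) with hfunx
  have hton : n.toNat = nums1.length := by omega
  have hflen : funx.length = n.toNat := by
    rw [hfunx, pv_foldl_setD_length, List.length_replicate]
  have hfmem : ∀ x ∈ funx, 0 ≤ x ∧ x < n := by
    rw [hfunx]
    refine pv_foldl_setD_mem nums1 n _ ?_ _ ?_
    · intro i hi
      exact PySem.List.mem_pyRange_one.1 hi
    · intro x hx
      rcases List.mem_replicate.1 hx with ⟨hne, rfl⟩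
      exact ⟨le_rfl, by omega⟩
  have hv : ∀ v ∈ nums2.take n.toNat, PySem.Raise.InRange funx.length v := by
    intro v hvm
    rw [hflen]
    have := h2 v (by rwa [hton] at hvm)
    unfold PySem.Raise.InRange
    constructor <;> omega
  have hbase : FenInv (n.toNat + 1) (List.replicate (n.toNat + 1) 0) [] := by
    refine ⟨by simp, ?_⟩
    intro j hj hjL
    simp [List.getD_eq_getElem?_getD, hjL]
  have key := pv_step nums2 funx n (by omega) hfmem hv n.toNat 0 0 0
    (List.replicate (n.toNat + 1) 0) [] le_rfl (by omega) (by simp) (by simp) hbase rfl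
  simp only [Int.toNat_zero, List.drop_zero] at key
  exact key
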